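-- pv_equiv track=rewrite | github.com/Shay-Nanigans/gcode-thing | BitmapToGcode.py | linesGrey
-- ===== SOURCE A (Python) =====
-- def linesGrey(imgArrGrey, upperGrey = 254, lowerGrey = 0):
--     lastWhite=True
--     lines=[]
--     newLine = []
--     for row in range(0, len(imgArrGrey)):
--         if not lastWhite:
--             lastWhite=True
--             if len(newLine) > 0:
--                 lines.append(newLine)
--                 newLine = []
--         for col in range(0,len(imgArrGrey[row])):
--             if imgArrGrey[row][col]>upperGrey or imgArrGrey[row][col]<lowerGrey:
--                 if not lastWhite:
--                     lastWhite=True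
--                     if len(newLine) > 0:
--                         lines.append(newLine)
--                         newLine = []
--             else:
--                 newLine.append([row, col, imgArrGrey[row][col]])
--                 lastWhite = False
--     if len(newLine) > 0:
--         lines.append(newLine)
--     return lines
-- ===== SOURCE B (Python) =====
-- def linesGrey(imgArrGrey, upperGrey=254, lowerGrey=0):
--     lines = []
--     for r, row in enumerate(imgArrGrey):
--         c, n = 0, len(row)
--         while c < n:
--             if lowerGrey <= row[c] <= upperGrey:
--                 start = c
--                 while c < n and lowerGrey <= row[c] <= upperGrey:
--                     c += 1
--                 lines.append([[r, j, row[j]] for j in range(start, c)])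
--             else:
--                 c += 1
--     return lines
-- ===== Notes on version B (the rewrite author's own statement) =====
-- stated objective: alternative
-- what changed: Replaced A's cross-row lastWhite/newLine state machine (flag plus deferred flush at row starts and at the end) by a per-row two-pointer scan that, on meeting a non-white pixel, advances a second index to the end of the run and emits the whole run at once via a comprehension.
import Mathlib
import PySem

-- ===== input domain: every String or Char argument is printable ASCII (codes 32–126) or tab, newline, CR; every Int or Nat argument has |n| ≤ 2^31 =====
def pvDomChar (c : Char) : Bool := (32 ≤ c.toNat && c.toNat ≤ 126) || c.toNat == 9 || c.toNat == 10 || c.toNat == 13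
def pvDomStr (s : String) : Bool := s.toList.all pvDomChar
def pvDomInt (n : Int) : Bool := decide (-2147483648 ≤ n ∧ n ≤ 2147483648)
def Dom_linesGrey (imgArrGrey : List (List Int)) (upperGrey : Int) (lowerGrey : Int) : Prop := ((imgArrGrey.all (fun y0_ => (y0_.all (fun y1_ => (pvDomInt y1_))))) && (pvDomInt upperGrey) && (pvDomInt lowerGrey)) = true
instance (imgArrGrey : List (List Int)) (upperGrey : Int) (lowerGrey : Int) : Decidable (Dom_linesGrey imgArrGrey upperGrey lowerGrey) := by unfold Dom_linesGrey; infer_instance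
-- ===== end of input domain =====

-- B replaces A's cross-row lastWhite/newLine state machine by a per-row two-pointer span
-- that emits each run of non-white pixels at once (objective: alternative; same cost).

-- ===== PORT A =====
-- state: (lastWhite, lines, newLine)
def pvStA : Type := Bool × List (List (List Int)) × List (List Int)

-- inner column loop of A, col index carried as Int (Python `for col in range(...)`)
def pvInnerA (u l r : Int) : Int → List Int → pvStA → pvStA
  | _, [], st => st
  | c, v :: rest, (lw, lines, nl) =>
    if v > u ∨ v < l then
      if !lw then
        pvInnerA u l r (c+1) rest
          (true, if nl.length > 0 then lines ++ [nl] else lines,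
           if nl.length > 0 then [] else nl)
      else pvInnerA u l r (c+1) rest (lw, lines, nl)
    else pvInnerA u l r (c+1) rest (false, lines, nl ++ [[r, c, v]])

-- outer row loop of A (row-start flush, then the column loop)
def pvRowsA (u l : Int) : Int → List (List Int) → pvStA → pvStA
  | _, [], st => st
  | r, row :: rest, (lw, lines, nl) =>
    let st1 : pvStA :=
      if !lw then
        (true, if nl.length > 0 then lines ++ [nl] else lines,
         if nl.length > 0 then [] else nl)
      else (lw, lines, nl)
    pvRowsA u l (r+1) rest (pvInnerA u l r 0 row st1)

def linesGrey (imgArrGrey : List (List Int)) (upperGrey : Int) (lowerGrey : Int) : List (List (List Int)) :=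
  let st := pvRowsA upperGrey lowerGrey 0 imgArrGrey (true, [], [])
  if st.2.2.length > 0 then st.2.1 ++ [st.2.2] else st.2.1

-- ===== PORT B =====
def pvNonWhite (u l v : Int) : Bool := decide (l ≤ v) && decide (v ≤ u)

-- Int-indexed enumerate (Python enumerate / range indices)
def pvEnum (i : Int) : List Int → List (Int × Int)
  | [] => []
  | x :: xs => (i, x) :: pvEnum (i+1) xs

-- two-pointer span: emit the whole run starting at a non-white pixel, then continue after it
def pvRunsB (u l r : Int) : List (Int × Int) → List (List (List Int))
  | [] => []
  | (c, v) :: rest =>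
    if pvNonWhite u l v then
      (((c, v) :: rest.takeWhile (fun p => pvNonWhite u l p.2)).map (fun p => [r, p.1, p.2]))
        :: pvRunsB u l r (rest.dropWhile (fun p => pvNonWhite u l p.2))
    else pvRunsB u l r rest
termination_by ps => ps.length
decreasing_by
  · exact Nat.lt_succ_of_le (rest.length_dropWhile_le _)
  · exact Nat.lt_succ_of_le (Nat.le_refl _)

def pvRowsB (u l : Int) : Int → List (List Int) → List (List (List Int))
  | _, [] => []
  | r, row :: rest => pvRunsB u l r (pvEnum 0 row) ++ pvRowsB u l (r+1) rest

def linesGrey_alt (imgArrGrey : List (List Int)) (upperGrey : Int) (lowerGrey : Int) : List (List (List Int)) :=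
  pvRowsB upperGrey lowerGrey 0 imgArrGrey

-- ===== PRECONDITION & SPEC =====
def Spec_linesGrey (imgArrGrey : List (List Int)) (upperGrey : Int) (lowerGrey : Int) (out : List (List (List Int))) : Prop := out = linesGrey_alt imgArrGrey upperGrey lowerGrey
instance (imgArrGrey : List (List Int)) (upperGrey : Int) (lowerGrey : Int) (out : List (List (List Int))) : Decidable (Spec_linesGrey imgArrGrey upperGrey lowerGrey out) := by unfold Spec_linesGrey; infer_instance

-- ===== CLAIM (what is proved, stated in full; the proofs are below) =====
def Claim_equal_linesGrey : Prop := ∀ (imgArrGrey : List (List Int)) (upperGrey : Int) (lowerGrey : Int), Dom_linesGrey imgArrGrey upperGrey lowerGrey → Spec_linesGrey imgArrGrey upperGrey lowerGrey (linesGrey imgArrGrey upperGrey lowerGrey)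

-- ===== LEMMAS AND PROOFS =====

-- flush of A's state: append the pending run if non-empty
def pvFlush (st : pvStA) : List (List (List Int)) :=
  if st.2.2.length > 0 then st.2.1 ++ [st.2.2] else st.2.1

-- invariant of A's state machine
def pvInv (st : pvStA) : Prop := st.1 = true ↔ st.2.2 = []

-- continuation of an open run: what B's grouping yields when a non-empty run nl is open
def pvCont (u l r : Int) (nl : List (List Int)) : List (Int × Int) → List (List (List Int))
  | [] => [nl]
  | (c, v) :: rest =>
    if pvNonWhite u l v then pvCont u l r (nl ++ [[r, c, v]]) rest
    else nl :: pvRunsB u l r rest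

theorem pvWhite_iff (u l v : Int) : (v > u ∨ v < l) ↔ pvNonWhite u l v = false := by
  simp [pvNonWhite]; omega

theorem pvCont_eq (u l r : Int) (nl : List (List Int)) (ps : List (Int × Int)) :
    pvCont u l r nl ps =
      (nl ++ (ps.takeWhile (fun p => pvNonWhite u l p.2)).map (fun p => [r, p.1, p.2]))
        :: pvRunsB u l r (ps.dropWhile (fun p => pvNonWhite u l p.2)) := by
  induction ps generalizing nl with
  | nil => simp [pvCont, pvRunsB]
  | cons p rest ih =>
    obtain ⟨c, v⟩ := p
    by_cases h : pvNonWhite u l v = true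
    · simp [pvCont, h, ih]
    · simp at h
      simp [pvCont, h, pvRunsB]

-- the column loop of A, against B's per-row grouping (fresh state and open-run state together)
theorem pvInnerA_spec (u l r : Int) (vals : List Int) :
    ∀ (c : Int) (lines : List (List (List Int))),
      (pvInv (pvInnerA u l r c vals (true, lines, [])) ∧
        pvFlush (pvInnerA u l r c vals (true, lines, [])) =
          lines ++ pvRunsB u l r (pvEnum c vals)) ∧
      (∀ nl, nl ≠ [] →
        pvInv (pvInnerA u l r c vals (false, lines, nl)) ∧
          pvFlush (pvInnerA u l r c vals (false, lines, nl)) =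
            lines ++ pvCont u l r nl (pvEnum c vals)) := by
  induction vals with
  | nil =>
    intro c lines
    constructor
    · simp [pvInnerA, pvInv, pvFlush, pvEnum, pvRunsB]
    · intro nl hnl
      have hlen : nl.length > 0 := List.length_pos_iff.mpr hnl
      simp [pvInnerA, pvInv, pvFlush, pvEnum, pvCont, hnl, hlen]
  | cons v rest ih =>
    intro c lines
    by_cases hw : v > u ∨ v < l
    · have hnw : pvNonWhite u l v = false := (pvWhite_iff u l v).mp hw
      constructor
      · -- fresh state, white pixel: state unchanged
        have hred : pvInnerA u l r c (v :: rest) (true, lines, []) =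
            pvInnerA u l r (c+1) rest (true, lines, []) := by
          simp [pvInnerA, hw]
        have h1 := (ih (c+1) lines).1
        rw [hred]
        refine ⟨h1.1, ?_⟩
        rw [h1.2, pvEnum]
        simp [pvRunsB, hnw]
      · -- open run, white pixel: flush and start fresh
        intro nl hnl
        have hlen : nl.length > 0 := List.length_pos_iff.mpr hnl
        have hred : pvInnerA u l r c (v :: rest) (false, lines, nl) =
            pvInnerA u l r (c+1) rest (true, lines ++ [nl], []) := by
          simp [pvInnerA, hw, hlen]
        have h1 := (ih (c+1) (lines ++ [nl])).1
        rw [hred]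
        refine ⟨h1.1, ?_⟩
        rw [h1.2, pvEnum]
        simp [pvCont, hnw]
    · have hnw : pvNonWhite u l v = true := by
        simp [pvNonWhite]; omega
      constructor
      · -- fresh state, non-white pixel: open a run
        have hred : pvInnerA u l r c (v :: rest) (true, lines, []) =
            pvInnerA u l r (c+1) rest (false, lines, [[r, c, v]]) := by
          simp [pvInnerA, hw]
        have h2 := (ih (c+1) lines).2 [[r, c, v]] (by simp)
        rw [hred]
        refine ⟨h2.1, ?_⟩
        rw [h2.2, pvCont_eq, pvEnum]
        simp [pvRunsB, hnw]
      · -- open run, non-white pixel: extend the run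
        intro nl hnl
        have hred : pvInnerA u l r c (v :: rest) (false, lines, nl) =
            pvInnerA u l r (c+1) rest (false, lines, nl ++ [[r, c, v]]) := by
          simp [pvInnerA, hw]
        have h2 := (ih (c+1) lines).2 (nl ++ [[r, c, v]]) (by simp)
        rw [hred]
        refine ⟨h2.1, ?_⟩
        rw [h2.2, pvEnum]
        simp [pvCont, hnw]

-- the row loop of A against B's row loop
theorem pvRowsA_spec (u l : Int) (rows : List (List Int)) :
    ∀ (r : Int) (st : pvStA), pvInv st →
      pvFlush (pvRowsA u l r rows st) = pvFlush st ++ pvRowsB u l r rows := by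
  induction rows with
  | nil => intro r st _; simp [pvRowsA, pvRowsB]
  | cons row rest ih =>
    intro r st hinv
    obtain ⟨lw, lines, nl⟩ := st
    cases lw with
    | true =>
      have hnl : nl = [] := by simpa [pvInv] using hinv
      subst hnl
      have hin := (pvInnerA_spec u l r row 0 lines).1
      have hrec := ih (r+1) (pvInnerA u l r 0 row (true, lines, [])) hin.1
      rw [pvRowsA]
      simp only [Bool.not_true, Bool.false_eq_true, if_false]
      rw [hrec, hin.2, pvRowsB]
      simp [pvFlush]
    | false =>
      have hnl : nl ≠ [] := by
        intro h
        simp [pvInv, h] at hinv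
      have hlen : nl.length > 0 := List.length_pos_iff.mpr hnl
      have hin := (pvInnerA_spec u l r row 0 (lines ++ [nl])).1
      have hrec := ih (r+1) (pvInnerA u l r 0 row (true, lines ++ [nl], [])) hin.1
      rw [pvRowsA]
      simp only [Bool.not_false, hlen, if_pos]
      rw [hrec, hin.2, pvRowsB]
      simp [pvFlush, hlen]

-- ===== VERDICT (by name: the statement is the Claim_ definition above) =====
theorem linesGrey_spec : Claim_equal_linesGrey := by
  intro img u l _
  unfold Spec_linesGrey linesGrey linesGrey_alt
  have h := pvRowsA_spec u l img 0 (true, [], []) (by simp [pvInv])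
  simpa [pvFlush] using h
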